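-- pv_equiv track=rewrite | github.com/NoahWolk1/SongNote | huggingface_space_setup/musical_tts_singing.py | extract_primary_vowel
-- ===== SOURCE A (Python) =====
-- def extract_primary_vowel(syllable_info):
--     """Extract the primary vowel sound from syllable"""
--     if not syllable_info or 'text' not in syllable_info:
--         return 'ah'
--
--     text = syllable_info['text'].lower()
--
--     # Simple vowel mapping based on spelling
--     vowel_map = {
--         'a': 'ah', 'aa': 'ah', 'ar': 'ah',
--         'e': 'eh', 'ea': 'ee', 'ee': 'ee', 'er': 'er',
--         'i': 'ih', 'ie': 'ee', 'ir': 'er',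
--         'o': 'oh', 'oo': 'oo', 'or': 'or',
--         'u': 'uh', 'ur': 'er',
--         'y': 'ih'
--     }
--
--     # Look for vowel patterns in the text
--     for pattern, vowel in vowel_map.items():
--         if pattern in text:
--             return vowel
--
--     # Default fallback
--     for char in text:
--         if char in 'aeiou':
--             return {'a': 'ah', 'e': 'eh', 'i': 'ih', 'o': 'oh', 'u': 'uh'}[char]
--
--     return 'ah'  # Default vowel
-- ===== SOURCE B (Python) =====
-- def extract_primary_vowel(syllable_info):
--     """Extract the primary vowel sound from syllable"""
--     if not syllable_info or 'text' not in syllable_info: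
--         return 'ah'
--     text = syllable_info['text'].lower()
--     # priority ladder: the first single letter found decides; multi-letter
--     # patterns of the original map are unreachable behind their single letter
--     if 'a' in text:
--         return 'ah'
--     if 'e' in text:
--         return 'eh'
--     if 'i' in text:
--         return 'ih'
--     if 'o' in text:
--         return 'oh'
--     if 'u' in text:
--         return 'uh'
--     if 'y' in text:
--         return 'ih'
--     return 'ah'
-- ===== Notes on version B (the rewrite author's own statement) =====
-- stated objective: simpler
-- what changed: B replaces A's iteration over the 16-entry vowel_map plus a second fallback char-scan loop with a direct six-test priority ladder (a>e>i>o>u>y), which is equivalent because every multi-letter pattern in the map is preceded and subsumed by its single-letter prefix and the fallback loop can only return 'ah'.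
import Mathlib
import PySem

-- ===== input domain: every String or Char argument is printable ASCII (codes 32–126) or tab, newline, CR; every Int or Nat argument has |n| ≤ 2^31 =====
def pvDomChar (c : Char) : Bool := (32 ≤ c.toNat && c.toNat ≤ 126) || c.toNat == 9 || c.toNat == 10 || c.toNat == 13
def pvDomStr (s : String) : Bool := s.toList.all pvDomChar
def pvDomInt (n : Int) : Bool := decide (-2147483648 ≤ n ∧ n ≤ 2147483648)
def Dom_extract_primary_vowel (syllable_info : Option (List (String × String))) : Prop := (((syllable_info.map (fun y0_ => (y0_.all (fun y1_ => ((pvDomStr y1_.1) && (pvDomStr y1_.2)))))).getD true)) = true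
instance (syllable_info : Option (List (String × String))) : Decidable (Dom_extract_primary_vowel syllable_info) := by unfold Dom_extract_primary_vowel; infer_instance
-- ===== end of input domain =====

-- B replaces A's iteration over a 16-entry pattern map plus a second char-scan loop by a
-- direct six-test priority ladder (simpler; the multi-letter map entries are unreachable).

-- ===== PORT A =====
-- the vowel_map dict literal, as its insertion-ordered item list (keys are distinct)
def pvVowelMapItems : List (String × String) :=
  [("a", "ah"), ("aa", "ah"), ("ar", "ah"),
   ("e", "eh"), ("ea", "ee"), ("ee", "ee"), ("er", "er"),
   ("i", "ih"), ("ie", "ee"), ("ir", "er"),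
   ("o", "oh"), ("oo", "oo"), ("or", "or"),
   ("u", "uh"), ("ur", "er"),
   ("y", "ih")]

-- 'for pattern, vowel in vowel_map.items(): if pattern in text: return vowel'
def pvScanPatterns : List (String × String) → List Char → Option String
  | [], _ => none
  | (p, v) :: rest, t => if PySem.Chars.isIn p.toList t then some v else pvScanPatterns rest t

-- 'for char in text: if char in "aeiou": return {...}[char]' (the KeyError branch is
-- unreachable because of the guard; getD's default is never used)
def pvScanChars : List Char → String
  | [] => "ah"
  | c :: rest =>
      if PySem.Chars.isIn [c] ['a', 'e', 'i', 'o', 'u'] then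
        PySem.Dict.getD (PySem.Dict.ofList
          [("a", "ah"), ("e", "eh"), ("i", "ih"), ("o", "oh"), ("u", "uh")]) (String.ofList [c]) "ah"
      else pvScanChars rest

def extract_primary_vowel (syllable_info : Option (List (String × String))) : String :=
  match syllable_info with
  | none => "ah"
  | some d =>
    if d.isEmpty then "ah"
    else
      match (PySem.Dict.mk d).get? "text" with
      | none => "ah"
      | some v =>
        let t := PySem.Chars.lower v.toList
        match pvScanPatterns pvVowelMapItems t with
        | some vw => vw
        | none => pvScanChars t

-- ===== PORT B =====
def extract_primary_vowel_alt (syllable_info : Option (List (String × String))) : String :=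
  match syllable_info with
  | none => "ah"
  | some d =>
    if d.isEmpty then "ah"
    else
      match (PySem.Dict.mk d).get? "text" with
      | none => "ah"
      | some v =>
        let t := PySem.Chars.lower v.toList
        if PySem.Chars.isIn ['a'] t then "ah"
        else if PySem.Chars.isIn ['e'] t then "eh"
        else if PySem.Chars.isIn ['i'] t then "ih"
        else if PySem.Chars.isIn ['o'] t then "oh"
        else if PySem.Chars.isIn ['u'] t then "uh"
        else if PySem.Chars.isIn ['y'] t then "ih"
        else "ah"

-- ===== PRECONDITION & SPEC =====
def Spec_extract_primary_vowel (syllable_info : Option (List (String × String))) (out : String) : Prop := out = extract_primary_vowel_alt syllable_info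
instance (syllable_info : Option (List (String × String))) (out : String) : Decidable (Spec_extract_primary_vowel syllable_info out) := by unfold Spec_extract_primary_vowel; infer_instance

-- ===== CLAIM (what is proved, stated in full; the proofs are below) =====
def Claim_equal_extract_primary_vowel : Prop := ∀ (syllable_info : Option (List (String × String))), Dom_extract_primary_vowel syllable_info → Spec_extract_primary_vowel syllable_info (extract_primary_vowel syllable_info)

-- ===== LEMMAS AND PROOFS =====

theorem singleton_infix_iff_mem (c : Char) (t : List Char) : [c] <:+: t ↔ c ∈ t := by
  constructor
  · intro h; exact h.subset (List.mem_singleton_self c)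
  · intro h
    obtain ⟨s1, s2, rfl⟩ := List.append_of_mem h
    exact ⟨s1, s2, by simp⟩

theorem isIn_singleton_iff (c : Char) (t : List Char) :
    PySem.Chars.isIn [c] t = true ↔ c ∈ t := by
  rw [PySem.Chars.isIn_iff_infix, singleton_infix_iff_mem]

theorem isIn_false_of_not_mem (p t : List Char) (c : Char) (hc : c ∈ p) (h : c ∉ t) :
    PySem.Chars.isIn p t = false := by
  rw [PySem.Chars.isIn_eq_false_iff]
  intro hinf
  exact h (hinf.subset hc)

theorem scanChars_no_vowel (t : List Char)
    (ha : 'a' ∉ t) (he : 'e' ∉ t) (hi : 'i' ∉ t) (ho : 'o' ∉ t) (hu : 'u' ∉ t) :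
    pvScanChars t = "ah" := by
  induction t with
  | nil => rfl
  | cons c rest ih =>
    simp only [List.mem_cons, not_or] at ha he hi ho hu
    rw [pvScanChars]
    have hguard : PySem.Chars.isIn [c] ['a', 'e', 'i', 'o', 'u'] = false := by
      rw [PySem.Chars.isIn_eq_false_iff, singleton_infix_iff_mem]
      intro hmem
      have : c = 'a' ∨ c = 'e' ∨ c = 'i' ∨ c = 'o' ∨ c = 'u' := by
        simpa using hmem
      rcases this with rfl | rfl | rfl | rfl | rfl
      · exact ha.1 rfl
      · exact he.1 rfl
      · exact hi.1 rfl
      · exact ho.1 rfl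
      · exact hu.1 rfl
    rw [hguard]
    simp only [Bool.false_eq_true, if_false]
    exact ih ha.2 he.2 hi.2 ho.2 hu.2

-- the core fact: A's map scan + fallback equals B's priority ladder, for any text
theorem body_eq (t : List Char) :
    (match pvScanPatterns pvVowelMapItems t with
     | some vw => vw
     | none => pvScanChars t) =
    (if PySem.Chars.isIn ['a'] t then "ah"
     else if PySem.Chars.isIn ['e'] t then "eh"
     else if PySem.Chars.isIn ['i'] t then "ih"
     else if PySem.Chars.isIn ['o'] t then "oh"
     else if PySem.Chars.isIn ['u'] t then "uh"
     else if PySem.Chars.isIn ['y'] t then "ih"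
     else "ah") := by
  by_cases ha : PySem.Chars.isIn ['a'] t = true
  · simp [pvScanPatterns, pvVowelMapItems, ha]
  · have ha' : 'a' ∉ t := fun h => ha ((isIn_singleton_iff 'a' t).mpr h)
    have Faa := isIn_false_of_not_mem ['a', 'a'] t 'a' (by decide) ha'
    have Far := isIn_false_of_not_mem ['a', 'r'] t 'a' (by decide) ha'
    by_cases he : PySem.Chars.isIn ['e'] t = true
    · simp [pvScanPatterns, pvVowelMapItems, ha, he, Faa, Far]
    · have he' : 'e' ∉ t := fun h => he ((isIn_singleton_iff 'e' t).mpr h)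
      have Fea := isIn_false_of_not_mem ['e', 'a'] t 'e' (by decide) he'
      have Fee := isIn_false_of_not_mem ['e', 'e'] t 'e' (by decide) he'
      have Fer := isIn_false_of_not_mem ['e', 'r'] t 'e' (by decide) he'
      by_cases hi : PySem.Chars.isIn ['i'] t = true
      · simp [pvScanPatterns, pvVowelMapItems, ha, he, hi, Faa, Far, Fea, Fee, Fer]
      · have hi' : 'i' ∉ t := fun h => hi ((isIn_singleton_iff 'i' t).mpr h)
        have Fie := isIn_false_of_not_mem ['i', 'e'] t 'i' (by decide) hi'
        have Fir := isIn_false_of_not_mem ['i', 'r'] t 'i' (by decide) hi'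
        by_cases ho : PySem.Chars.isIn ['o'] t = true
        · simp [pvScanPatterns, pvVowelMapItems, ha, he, hi, ho,
            Faa, Far, Fea, Fee, Fer, Fie, Fir]
        · have ho' : 'o' ∉ t := fun h => ho ((isIn_singleton_iff 'o' t).mpr h)
          have Foo := isIn_false_of_not_mem ['o', 'o'] t 'o' (by decide) ho'
          have For := isIn_false_of_not_mem ['o', 'r'] t 'o' (by decide) ho'
          by_cases hu : PySem.Chars.isIn ['u'] t = true
          · simp [pvScanPatterns, pvVowelMapItems, ha, he, hi, ho, hu,
              Faa, Far, Fea, Fee, Fer, Fie, Fir, Foo, For]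
          · have hu' : 'u' ∉ t := fun h => hu ((isIn_singleton_iff 'u' t).mpr h)
            have Fur := isIn_false_of_not_mem ['u', 'r'] t 'u' (by decide) hu'
            by_cases hy : PySem.Chars.isIn ['y'] t = true
            · simp [pvScanPatterns, pvVowelMapItems, ha, he, hi, ho, hu, hy,
                Faa, Far, Fea, Fee, Fer, Fie, Fir, Foo, For, Fur]
            · simp [pvScanPatterns, pvVowelMapItems, ha, he, hi, ho, hu, hy,
                Faa, Far, Fea, Fee, Fer, Fie, Fir, Foo, For, Fur,
                scanChars_no_vowel t ha' he' hi' ho' hu']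

-- ===== VERDICT (by name: the statement is the Claim_ definition above) =====
theorem extract_primary_vowel_spec : Claim_equal_extract_primary_vowel := by
  intro si _
  unfold Spec_extract_primary_vowel extract_primary_vowel extract_primary_vowel_alt
  match si with
  | none => rfl
  | some d =>
    by_cases hd : d.isEmpty
    · simp [hd]
    · simp only [hd, Bool.false_eq_true, if_false]
      match (PySem.Dict.mk d).get? "text" with
      | none => rfl
      | some v => exact body_eq (PySem.Chars.lower v.toList)
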